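-- pv_equiv track=rewrite | github.com/Dasha-p/works | laba-4/3.py | findempty
-- ===== SOURCE A (Python) =====
-- def findempty(arr):
--     for i in range(len(arr) - 1):
--         if arr[i] == '(' and ( "(" not in arr[i:] or '[' not in arr[i:]) and ')' in arr[i:]:
--             b = arr[i:]
--             j = b.index(')') + i
--             if len(arr[i:j]) == 1:
--                 return i, j
--         elif arr[i] == '[' and ( "(" not in arr[i:] or '[' not in arr[i:]) and ']' in arr[i:]:
--             b = arr[i:]
--             j = b.index(']') + i
--             if len(arr[i:j]) == 1:
--                 return i, j
-- ===== SOURCE B (Python) =====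
-- def findempty(arr):
--     # one backward scan: flags say whether an opening square/round bracket occurs to the right;
--     # overwrite the answer right-to-left so the final one is the leftmost match
--     has_sq = has_par = False
--     ans = None
--     for i in range(len(arr) - 1, -1, -1):
--         c = arr[i]
--         if c == '(' and not has_sq and i + 1 < len(arr) and arr[i + 1] == ')':
--             ans = (i, i + 1)
--         elif c == '[' and not has_par and i + 1 < len(arr) and arr[i + 1] == ']':
--             ans = (i, i + 1)
--         if c == '[':
--             has_sq = True
--         elif c == '(':
--             has_par = True
--     return ans
-- ===== Notes on version B (the rewrite author's own statement) =====
-- stated objective: alternative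
-- what changed: A rescans the suffix arr[i:] at every index (slices, three substring searches and an index call); B does one backward pass carrying two booleans that say whether an opening square or round bracket occurs further right, overwriting the answer right-to-left so the leftmost empty pair wins.
import Mathlib
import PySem

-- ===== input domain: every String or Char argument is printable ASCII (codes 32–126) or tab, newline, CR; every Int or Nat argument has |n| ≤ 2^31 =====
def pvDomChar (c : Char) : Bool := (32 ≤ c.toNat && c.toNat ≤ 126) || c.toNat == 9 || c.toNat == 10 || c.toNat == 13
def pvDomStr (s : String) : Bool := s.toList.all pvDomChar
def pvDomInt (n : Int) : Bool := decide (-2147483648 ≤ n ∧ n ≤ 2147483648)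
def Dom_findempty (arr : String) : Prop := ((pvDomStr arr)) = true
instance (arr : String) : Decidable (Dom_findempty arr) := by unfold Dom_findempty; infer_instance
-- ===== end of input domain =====

-- B replaces A's per-index suffix rescans (a slice, three substring searches and an index call)
-- by a single backward pass carrying two suffix-presence flags; objective: alternative.

-- ===== PORT A =====
-- one iteration of A's loop body at index i (returns some = Python's `return`, none = fall through)
def findemptyAStep (s : List Char) (i : Int) : Option (Int × Int) :=
  let suf := PySem.List.slice s (some i) none     -- arr[i:]
  if PySem.List.pyGet? s i = some '(' ∧
      (¬ PySem.Chars.isIn ['('] suf = true ∨ ¬ PySem.Chars.isIn ['['] suf = true) ∧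
      PySem.Chars.isIn [')'] suf = true then
    -- b.index(')') : guarded by `')' in b`, so find = index here (no ValueError)
    let j := PySem.Chars.find suf [')'] + i
    if (PySem.List.slice s (some i) (some j)).length = 1 then some (i, j) else none
  else if PySem.List.pyGet? s i = some '[' ∧
      (¬ PySem.Chars.isIn ['('] suf = true ∨ ¬ PySem.Chars.isIn ['['] suf = true) ∧
      PySem.Chars.isIn [']'] suf = true then
    let j := PySem.Chars.find suf [']'] + i
    if (PySem.List.slice s (some i) (some j)).length = 1 then some (i, j) else none
  else none

-- `for i in range(len(arr) - 1): … return …` over the range list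
def findemptyALoop (s : List Char) : List Int → Option (Int × Int)
  | [] => none
  | i :: rest =>
    match findemptyAStep s i with
    | some r => some r
    | none => findemptyALoop s rest

def findempty (arr : String) : Option (Int × Int) :=
  findemptyALoop arr.toList (PySem.List.pyRange 0 ((arr.toList.length : Int) - 1) 1)

-- ===== PORT B =====
-- backward scan of Source B: state (has_sq, has_par, ans); position i is processed last
def findemptyBGo (i : Nat) : List Char → Bool × Bool × Option (Int × Int)
  | [] => (false, false, none)
  | c :: rest =>
    let r := findemptyBGo (i + 1) rest
    let ans :=
      if c = '(' ∧ r.1 = false ∧ rest.head? = some ')' then some ((i : Int), (i : Int) + 1)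
      else if c = '[' ∧ r.2.1 = false ∧ rest.head? = some ']' then some ((i : Int), (i : Int) + 1)
      else r.2.2
    (r.1 || decide (c = '['), r.2.1 || decide (c = '('), ans)

def findempty_alt (arr : String) : Option (Int × Int) :=
  (findemptyBGo 0 arr.toList).2.2

-- ===== PRECONDITION & SPEC =====
def Spec_findempty (arr : String) (out : Option (Int × Int)) : Prop := out = findempty_alt arr
instance (arr : String) (out : Option (Int × Int)) : Decidable (Spec_findempty arr out) := by unfold Spec_findempty; infer_instance

-- ===== CLAIM (what is proved, stated in full; the proofs are below) =====
def Claim_equal_findempty : Prop := ∀ (arr : String), Dom_findempty arr → Spec_findempty arr (findempty arr)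

-- ===== LEMMAS AND PROOFS =====

theorem singleton_prefix_iff_head {a : Char} {l : List Char} :
    ([a] <+: l) ↔ l.head? = some a := by
  cases l with
  | nil => simp
  | cons b t => simp [List.cons_prefix_cons, eq_comm]

-- at the first character ≠ a, `find` = 1 exactly when the next character is a
theorem find_singleton_eq_one {c a : Char} {rest : List Char} (hca : c ≠ a) :
    PySem.Chars.find (c :: rest) [a] = 1 ↔ rest.head? = some a := by
  constructor
  · intro h
    have h0 : (0 : Int) ≤ PySem.Chars.find (c :: rest) [a] := by omega
    have := (PySem.Chars.find_spec h0).1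
    rw [h] at this
    simpa [singleton_prefix_iff_head] using this
  · intro h
    have hmem : [a] <:+: (c :: rest) := by
      refine (List.singleton_infix_iff a (c :: rest)).2 ?_
      rcases rest with _ | ⟨b, t⟩
      · simp at h
      · simp at h; simp [h]
    have h0 : (0 : Int) ≤ PySem.Chars.find (c :: rest) [a] :=
      (PySem.Chars.find_nonneg_iff _ _).2 hmem
    obtain ⟨hpre, hmin⟩ := PySem.Chars.find_spec h0
    set f := PySem.Chars.find (c :: rest) [a] with hf
    have hne0 : f.toNat ≠ 0 := by
      intro h0'
      rw [h0'] at hpre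
      simp at hpre
      exact hca hpre.symm
    have hle1 : f.toNat ≤ 1 := by
      by_contra hgt
      exact hmin 1 (by omega) (by simpa [singleton_prefix_iff_head] using h)
    omega

-- flags of the backward scan = presence in the suffix
theorem findemptyBGo_flags (t : List Char) : ∀ i : Nat,
    (findemptyBGo i t).1 = decide ('[' ∈ t) ∧ (findemptyBGo i t).2.1 = decide ('(' ∈ t) := by
  induction t with
  | nil => intro i; simp [findemptyBGo]
  | cons c rest ih =>
    intro i
    obtain ⟨h1, h2⟩ := ih (i + 1)
    simp only [findemptyBGo, h1, h2]
    constructor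
    · by_cases hm : '[' ∈ rest <;> by_cases he : c = '[' <;> simp [hm, he, eq_comm]
    · by_cases hm : '(' ∈ rest <;> by_cases he : c = '(' <;> simp [hm, he, eq_comm]

-- A's step at index i, rewritten as B's per-position test
theorem findemptyAStep_eq {s : List Char} {i : Nat} {c : Char}
    (hi : i + 1 < s.length) (hc : s[i]? = some c) :
    findemptyAStep s (i : Int) =
      (if c = '(' ∧ '[' ∉ s.drop (i + 1) ∧ (s.drop (i + 1)).head? = some ')'
        then some ((i : Int), (i : Int) + 1)
       else if c = '[' ∧ '(' ∉ s.drop (i + 1) ∧ (s.drop (i + 1)).head? = some ']'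
        then some ((i : Int), (i : Int) + 1)
       else none) := by
  have hlt : i < s.length := by omega
  have hceq : s[i]'hlt = c := by
    have := List.getElem?_eq_getElem hlt; rw [hc] at this; exact (Option.some_inj.1 this).symm
  have hdrop : s.drop i = c :: s.drop (i + 1) := by
    rw [List.drop_eq_getElem_cons hlt, hceq]
  have hsuf : PySem.List.slice s (some (i : Int)) none = s.drop i :=
    PySem.List.slice_from s (by omega)
  set rest := s.drop (i + 1) with hrest
  have hget : PySem.List.pyGet? s (i : Int) = some c := by
    rw [PySem.List.pyGet?_natCast]; exact hc
  have hlenrest : rest.length = s.length - (i + 1) := by simp [hrest]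
  -- generic inner-branch fact, for either bracket kind
  have inner : ∀ a : Char, c ≠ a → a ∈ (c :: rest) →
      ((PySem.List.slice s (some (i : Int))
          (some (PySem.Chars.find (c :: rest) [a] + (i : Int)))).length = 1
        ↔ rest.head? = some a) := by
    intro a hca hmem
    have hinf : [a] <:+: (c :: rest) := (List.singleton_infix_iff a (c :: rest)).2 hmem
    have h0 : (0 : Int) ≤ PySem.Chars.find (c :: rest) [a] :=
      (PySem.Chars.find_nonneg_iff _ _).2 hinf
    set f := PySem.Chars.find (c :: rest) [a] with hfdef
    have hfle : f ≤ (c :: rest).length := PySem.Chars.find_le_length _ _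
    have hfleN : f.toNat ≤ (c :: rest).length := by omega
    have hfi : f + (i : Int) = ((f.toNat + i : Nat) : Int) := by
      push_cast; omega
    have hslice : PySem.List.slice s (some (i : Int)) (some (f + (i : Int)))
        = (s.drop i).take (f.toNat + i - i) := by
      rw [hfi]
      exact_mod_cast PySem.List.slice_natCast s i (f.toNat + i)
    have hlen : ((s.drop i).take (f.toNat + i - i)).length = f.toNat := by
      simp only [List.length_take, List.length_drop]
      simp only [List.length_cons, hlenrest] at hfleN
      omega
    rw [hslice, hlen]
    have hiff : f.toNat = 1 ↔ f = 1 := by omega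
    rw [hiff]
    exact find_singleton_eq_one hca
  have hmem_par : PySem.Chars.isIn ['('] (c :: rest) = true ↔ '(' ∈ (c :: rest) := by
    rw [PySem.Chars.isIn_iff_infix]; exact List.singleton_infix_iff _ _
  have hmem_sq : PySem.Chars.isIn ['['] (c :: rest) = true ↔ '[' ∈ (c :: rest) := by
    rw [PySem.Chars.isIn_iff_infix]; exact List.singleton_infix_iff _ _
  have hmem_rp : PySem.Chars.isIn [')'] (c :: rest) = true ↔ ')' ∈ (c :: rest) := by
    rw [PySem.Chars.isIn_iff_infix]; exact List.singleton_infix_iff _ _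
  have hmem_rb : PySem.Chars.isIn [']'] (c :: rest) = true ↔ ']' ∈ (c :: rest) := by
    rw [PySem.Chars.isIn_iff_infix]; exact List.singleton_infix_iff _ _
  unfold findemptyAStep
  simp only [hsuf, hdrop, hget]
  by_cases hcp : c = '('
  · -- first outer branch: '(' is in the suffix, so the disjunction ⟺ '[' ∉ suffix
    subst hcp
    by_cases hsq : '[' ∈ rest
    · rw [if_neg (by
        rintro ⟨-, hd, -⟩
        rcases hd with h | h
        · exact h (hmem_par.2 (by simp))
        · exact h (hmem_sq.2 (by simp [hsq])))]
      rw [if_neg (by rintro ⟨h, -⟩; simp at h)]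
      rw [if_neg (by rintro ⟨-, h, -⟩; exact h hsq)]
      rw [if_neg (by rintro ⟨h, -⟩; simp at h)]
    · by_cases hrp : rest.head? = some ')'
      · have hmem : ')' ∈ ('(' :: rest) := by
          rcases rest with _ | ⟨b, t⟩
          · simp at hrp
          · simp at hrp; simp [hrp]
        rw [if_pos ⟨rfl, Or.inr (fun h => hsq (by
              have := hmem_sq.1 h; simpa using this)), hmem_rp.2 hmem⟩]
        rw [if_pos ((inner ')' (by decide) hmem).2 hrp)]
        rw [if_pos ⟨rfl, hsq, hrp⟩]
        rw [(find_singleton_eq_one (show '(' ≠ ')' by decide)).2 hrp]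
        simp [Int.add_comm]
      · by_cases hmem : ')' ∈ ('(' :: rest)
        · rw [if_pos ⟨rfl, Or.inr (fun h => hsq (by
                have := hmem_sq.1 h; simpa using this)), hmem_rp.2 hmem⟩]
          rw [if_neg (fun h => hrp ((inner ')' (by decide) hmem).1 h))]
          rw [if_neg (by rintro ⟨-, -, h⟩; exact hrp h)]
          rw [if_neg (by rintro ⟨h, -⟩; simp at h)]
        · rw [if_neg (by rintro ⟨-, -, h⟩; exact hmem (hmem_rp.1 h))]
          rw [if_neg (by rintro ⟨h, -⟩; simp at h)]
          rw [if_neg (by rintro ⟨-, -, h⟩; exact hrp h)]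
          rw [if_neg (by rintro ⟨h, -⟩; simp at h)]
  · rw [if_neg (by rintro ⟨h, -⟩; exact hcp (by simpa using h))]
    by_cases hcb : c = '['
    · subst hcb
      by_cases hpar : '(' ∈ rest
      · rw [if_neg (by
          rintro ⟨-, hd, -⟩
          rcases hd with h | h
          · exact h (hmem_par.2 (by simp [hpar]))
          · exact h (hmem_sq.2 (by simp)))]
        rw [if_neg (by rintro ⟨h, -⟩; simp at h)]
        rw [if_neg (by rintro ⟨-, h, -⟩; exact h hpar)]
      · by_cases hrb : rest.head? = some ']'
        · have hmem : ']' ∈ ('[' :: rest) := by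
            rcases rest with _ | ⟨b, t⟩
            · simp at hrb
            · simp at hrb; simp [hrb]
          rw [if_pos ⟨rfl, Or.inl (fun h => hpar (by
                have := hmem_par.1 h; simpa using this)), hmem_rb.2 hmem⟩]
          rw [if_pos ((inner ']' (by decide) hmem).2 hrb)]
          rw [if_neg (by rintro ⟨h, -⟩; simp at h)]
          rw [if_pos ⟨rfl, hpar, hrb⟩]
          rw [(find_singleton_eq_one (show '[' ≠ ']' by decide)).2 hrb]
          simp [Int.add_comm]
        · by_cases hmem : ']' ∈ ('[' :: rest)
          · rw [if_pos ⟨rfl, Or.inl (fun h => hpar (by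
                  have := hmem_par.1 h; simpa using this)), hmem_rb.2 hmem⟩]
            rw [if_neg (fun h => hrb ((inner ']' (by decide) hmem).1 h))]
            rw [if_neg (by rintro ⟨h, -⟩; simp at h)]
            rw [if_neg (by rintro ⟨-, -, h⟩; exact hrb h)]
          · rw [if_neg (by rintro ⟨-, -, h⟩; exact hmem (hmem_rb.1 h))]
            rw [if_neg (by rintro ⟨h, -⟩; simp at h)]
            rw [if_neg (by rintro ⟨-, -, h⟩; exact hrb h)]
    · rw [if_neg (by rintro ⟨h, -⟩; exact hcb (by simpa using h))]
      rw [if_neg (by rintro ⟨h, -⟩; exact hcp h)]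
      rw [if_neg (by rintro ⟨h, -⟩; exact hcb h)]

theorem findempty_main (s : List Char) (k : Nat) : ∀ i : Nat, s.length - i ≤ k →
    findemptyALoop s (PySem.List.pyRange (i : Int) ((s.length : Int) - 1) 1) =
      (findemptyBGo i (s.drop i)).2.2 := by
  induction k with
  | zero =>
    intro i hi
    have : s.length ≤ i := by omega
    rw [PySem.List.pyRange_one_eq_nil (by omega), List.drop_eq_nil_of_le this]
    simp [findemptyALoop, findemptyBGo]
  | succ k ih =>
    intro i hi
    by_cases hlast : i + 1 < s.length
    · have hlt : i < s.length := by omega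
      rw [PySem.List.pyRange_one_cons (by omega)]
      show (match findemptyAStep s (i : Int) with
            | some r => some r
            | none => findemptyALoop s (PySem.List.pyRange ((i : Int) + 1) ((s.length : Int) - 1) 1)) = _
      have hdrop : s.drop i = s[i]'hlt :: s.drop (i + 1) := List.drop_eq_getElem_cons hlt
      obtain ⟨h1, h2⟩ := findemptyBGo_flags (s.drop (i + 1)) (i + 1)
      rw [findemptyAStep_eq hlast (List.getElem?_eq_getElem hlt), hdrop]
      have hcast : (i : Int) + 1 = ((i + 1 : Nat) : Int) := by omega
      rw [hcast, ih (i + 1) (by omega)]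
      simp only [findemptyBGo, h1, h2]
      by_cases c1 : s[i]'hlt = '(' ∧ '[' ∉ s.drop (i + 1) ∧ (s.drop (i + 1)).head? = some ')'
      · rw [if_pos c1]
        have : (decide ('[' ∈ s.drop (i + 1)) = false) := by simp [c1.2.1]
        simp [c1.1, this, c1.2.2]
      · rw [if_neg c1]
        by_cases c2 : s[i]'hlt = '[' ∧ '(' ∉ s.drop (i + 1) ∧ (s.drop (i + 1)).head? = some ']'
        · rw [if_pos c2]
          have : (decide ('(' ∈ s.drop (i + 1)) = false) := by simp [c2.2.1]
          simp [c2.1, this, c2.2.2]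
        · rw [if_neg c2]
          simp only []
          rw [if_neg (by
            rintro ⟨ha, hb, hc⟩
            exact c1 ⟨ha, by simpa using hb, hc⟩)]
          rw [if_neg (by
            rintro ⟨ha, hb, hc⟩
            exact c2 ⟨ha, by simpa using hb, hc⟩)]
    · -- at most one position left: A's range is empty, B finds nothing in the ≤1-char suffix
      rw [PySem.List.pyRange_one_eq_nil (by omega)]
      show none = _
      rcases Nat.lt_or_ge i s.length with hlt | hge
      · have hdrop : s.drop i = s[i]'hlt :: s.drop (i + 1) := List.drop_eq_getElem_cons hlt
        have : s.drop (i + 1) = [] := List.drop_eq_nil_of_le (by omega)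
        rw [hdrop, this]
        simp [findemptyBGo]
      · rw [List.drop_eq_nil_of_le hge]; simp [findemptyBGo]

-- ===== VERDICT (by name: the statement is the Claim_ definition above) =====
theorem findempty_spec : Claim_equal_findempty := by
  intro arr _
  unfold Spec_findempty findempty findempty_alt
  have := findempty_main arr.toList arr.toList.length 0 (by omega)
  simpa using this
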